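-- pv_equiv track=rewrite | github.com/KumudaSG/ai-rtl-verifier | verifier.py | group_failed_checks
-- ===== SOURCE A (Python) =====
-- def group_failed_checks(checks):
--     grouped = {}
--
--     for check_name, passed in checks.items():
--         if passed:
--             continue
--
--         if check_name == "reached_end_of_testbench":
--             grouped.setdefault("framework", []).append("testbench did not finish cleanly")
--             continue
--
--         if check_name.endswith("_done"):
--             test_name = check_name[:-5]
--             grouped.setdefault("done", []).append(test_name)
--
--         elif check_name.endswith("_result"):
--             test_name = check_name[:-7]
--             grouped.setdefault("result", []).append(test_name)
--
--         elif check_name.endswith("_overflow"):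
--             test_name = check_name[:-9]
--             grouped.setdefault("overflow", []).append(test_name)
--
--         else:
--             grouped.setdefault("other", []).append(check_name)
--
--     return grouped
-- ===== SOURCE B (Python) =====
-- SUFFIX_TABLE = [("_done", "done"), ("_result", "result"), ("_overflow", "overflow")]
--
--
-- def _classify(check_name):
--     if check_name == "reached_end_of_testbench":
--         return ("framework", "testbench did not finish cleanly")
--     for suffix, category in SUFFIX_TABLE:
--         if check_name.endswith(suffix):
--             return (category, check_name[:-len(suffix)])
--     return ("other", check_name)
--
--
-- def group_failed_checks(checks):
--     pairs = [_classify(name) for name, passed in checks.items() if not passed]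
--     return {cat: [item for c, item in pairs if c == cat]
--             for cat in dict.fromkeys(c for c, _ in pairs)}
-- ===== Notes on version B (the rewrite author's own statement) =====
-- stated objective: idiomatic
-- what changed: Replaces A's single pass that mutates a dict via setdefault/append inside an if-elif chain by a table-driven classifier mapping each failed check to a (category, item) pair, followed by a group-by over the first-occurrence category order.
import Mathlib
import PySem

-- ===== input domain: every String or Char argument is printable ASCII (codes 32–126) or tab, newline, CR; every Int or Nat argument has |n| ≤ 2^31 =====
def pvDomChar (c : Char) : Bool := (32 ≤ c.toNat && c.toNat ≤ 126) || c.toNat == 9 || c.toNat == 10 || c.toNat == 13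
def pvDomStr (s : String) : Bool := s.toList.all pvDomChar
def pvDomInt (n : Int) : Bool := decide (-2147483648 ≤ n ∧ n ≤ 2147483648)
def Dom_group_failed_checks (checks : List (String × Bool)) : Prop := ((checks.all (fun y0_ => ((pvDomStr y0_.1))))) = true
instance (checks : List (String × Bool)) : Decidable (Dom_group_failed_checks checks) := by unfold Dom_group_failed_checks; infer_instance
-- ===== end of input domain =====

-- B replaces A's setdefault/append if-elif loop by a table-driven classifier plus a group-by
-- over first-occurrence category order (objective: idiomatic; return value only).

-- ===== PORT A =====
-- one body of A's loop; grouped.setdefault(k, []).append(x) is exactly Dict.modify k [] (· ++ [x])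
def groupStepA (grouped : PySem.Dict String (List String)) (pc : String × Bool) :
    PySem.Dict String (List String) :=
  if pc.2 then grouped
  else if pc.1 = "reached_end_of_testbench" then
    grouped.modify "framework" [] (· ++ ["testbench did not finish cleanly"])
  else if PySem.Str.endswith pc.1 "_done" then
    grouped.modify "done" [] (· ++ [PySem.Str.slice pc.1 none (some (-5))])
  else if PySem.Str.endswith pc.1 "_result" then
    grouped.modify "result" [] (· ++ [PySem.Str.slice pc.1 none (some (-7))])
  else if PySem.Str.endswith pc.1 "_overflow" then
    grouped.modify "overflow" [] (· ++ [PySem.Str.slice pc.1 none (some (-9))])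
  else
    grouped.modify "other" [] (· ++ [pc.1])

def group_failed_checks (checks : List (String × Bool)) : List (String × List String) :=
  (checks.foldl groupStepA PySem.Dict.empty).items

-- ===== PORT B =====
def suffixTable : List (String × String) :=
  [("_done", "done"), ("_result", "result"), ("_overflow", "overflow")]

-- the 'for suffix, category in SUFFIX_TABLE' loop of _classify
def classifyLoop (name : String) : List (String × String) → String × String
  | [] => ("other", name)
  | (suffix, category) :: rest =>
      if PySem.Str.endswith name suffix then
        (category, PySem.Str.slice name none (some (-(PySem.Str.len suffix : Int))))
      else classifyLoop name rest

def classifyB (name : String) : String × String :=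
  if name = "reached_end_of_testbench" then ("framework", "testbench did not finish cleanly")
  else classifyLoop name suffixTable

def group_failed_checks_alt (checks : List (String × Bool)) : List (String × List String) :=
  let pairs := (checks.filter (fun p => !p.2)).map (fun p => classifyB p.1)
  (PySem.Set.ofList (pairs.map (·.1))).map
    (fun cat => (cat, (pairs.filter (fun q => q.1 == cat)).map (·.2)))

-- ===== PRECONDITION & SPEC =====
def Spec_group_failed_checks (checks : List (String × Bool)) (out : List (String × List String)) : Prop := out = group_failed_checks_alt checks
instance (checks : List (String × Bool)) (out : List (String × List String)) : Decidable (Spec_group_failed_checks checks out) := by unfold Spec_group_failed_checks; infer_instance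

-- ===== CLAIM (what is proved, stated in full; the proofs are below) =====
def Claim_equal_group_failed_checks : Prop := ∀ (checks : List (String × Bool)), Dom_group_failed_checks checks → Spec_group_failed_checks checks (group_failed_checks checks)

-- ===== LEMMAS AND PROOFS =====

-- A's loop body, expressed through B's classifier
theorem groupStepA_eq (d : PySem.Dict String (List String)) (pc : String × Bool) :
    groupStepA d pc =
      if pc.2 then d
      else d.modify (classifyB pc.1).1 [] (· ++ [(classifyB pc.1).2]) := by
  obtain ⟨name, passed⟩ := pc
  have h5 : (PySem.Str.len "_done" : Int) = 5 := by decide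
  have h7 : (PySem.Str.len "_result" : Int) = 7 := by decide
  have h9 : (PySem.Str.len "_overflow" : Int) = 9 := by decide
  simp only [groupStepA, classifyB, suffixTable, classifyLoop, h5, h7, h9]
  split_ifs <;> rfl

-- A's whole fold, as a fold over B's classified pairs
theorem foldA_eq (checks : List (String × Bool)) (d : PySem.Dict String (List String)) :
    checks.foldl groupStepA d =
      ((checks.filter (fun p => !p.2)).map (fun p => classifyB p.1)).foldl
        (fun d p => d.modify p.1 [] (· ++ [p.2])) d := by
  induction checks generalizing d with
  | nil => rfl
  | cons pc rest ih =>
      obtain ⟨name, passed⟩ := pc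
      cases passed <;>
        simp [List.foldl_cons, groupStepA_eq, ih]

-- ===== VERDICT (by name: the statement is the Claim_ definition above) =====

theorem group_failed_checks_spec : Claim_equal_group_failed_checks := by
  intro checks _
  unfold Spec_group_failed_checks group_failed_checks group_failed_checks_alt
  rw [foldA_eq]
  set l := (checks.filter (fun p => !p.2)).map (fun p => classifyB p.1) with hl
  have hnd : (l.foldl (fun d p => d.modify p.1 [] (· ++ [p.2])) PySem.Dict.empty).keys.Nodup :=
    PySem.Dict.nodup_keys_foldl_modify_key l Prod.fst [] (fun d p => (· ++ [p.2]))
      PySem.Dict.empty PySem.Dict.nodup_keys_empty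
  rw [PySem.Dict.items_eq_map_keys _ hnd []]
  have hkeys : (l.foldl (fun d p => d.modify p.1 [] (· ++ [p.2])) PySem.Dict.empty).keys
      = PySem.Set.ofList (l.map (·.1)) := by
    rw [PySem.Dict.keys_foldl_modify_key l Prod.fst [] (fun d p => (· ++ [p.2]))]
    simp [PySem.Dict.keys_empty, PySem.Set.update_nil_left]
  rw [hkeys]
  refine List.map_congr_left (fun c _ => ?_)
  congr 1
  rw [PySem.Dict.getD_foldl_modify_append]
  simp [PySem.Dict.getD_empty]
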